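-- pv_equiv track=rewrite | github.com/LangeLab/ProteoForge_Analysis | ProteoForge/peptide_grouper.py | _find_overlapping_peptide_groups_optimized
-- ===== SOURCE A (Python) =====
-- from collections import defaultdict
-- from typing import List, Tuple, Dict, Set
--
-- def _find_overlapping_peptide_groups_optimized(
--     peptides: List[Tuple[int, int]],
--     max_diff: int = 3
-- ) -> List[Set[int]]:
--     """
--     Efficiently find groups of overlapping peptides using Union-Find.
--
--     Uses a sweep line algorithm with Union-Find data structure for O(n log n)
--     complexity instead of naive O(n²) approach.
--
--     Args:
--         peptides: List of (start_pos, end_pos) tuples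
--         max_diff: Maximum allowed difference for overlap detection
--
--     Returns:
--         List of sets, each containing indices of overlapping peptides
--     """
--     n = len(peptides)
--     if n == 0:
--         return []
--
--     # Sort peptides by start position for sweep line algorithm
--     indexed_peptides = [(start, end, idx) for idx, (start, end) in enumerate(peptides)]
--     indexed_peptides.sort()
--
--     # Union-Find with path compression
--     parent = list(range(n))
--
--     def find(x):
--         if parent[x] != x:
--             parent[x] = find(parent[x])  # Path compression
--         return parent[x]
--
--     def union(x, y):
--         px, py = find(x), find(y)
--         if px != py:
--             parent[px] = py
--
--     # Sweep line: only check peptides that could potentially overlap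
--     for i in range(n):
--         start1, end1, idx1 = indexed_peptides[i]
--
--         for j in range(i + 1, n):
--             start2, end2, idx2 = indexed_peptides[j]
--
--             # Early termination optimization
--             if start2 > end1 + max_diff:
--                 break
--
--             # Check overlap condition
--             if (abs(start1 - start2) <= max_diff and abs(end1 - end2) <= max_diff):
--                 union(idx1, idx2)
--
--     # Collect connected components
--     groups_dict = defaultdict(set)
--     for i in range(n):
--         root = find(i)
--         groups_dict[root].add(i)
--
--     return list(groups_dict.values())
-- ===== SOURCE B (Python) =====
-- def _find_overlapping_peptide_groups_optimized(peptides, max_diff=3):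
--     """Quick-find grouping: a flat label array relabelled on each merge, over the
--     same sorted sweep; groups read off the labels in order of minimal index."""
--     n = len(peptides)
--     label = list(range(n))
--     order = sorted(range(n), key=lambda k: peptides[k])
--     for a in range(n):
--         i = order[a]
--         s1, e1 = peptides[i]
--         for b in range(a + 1, n):
--             j = order[b]
--             s2, e2 = peptides[j]
--             if s2 > e1 + max_diff:
--                 break
--             if (abs(s1 - s2) <= max_diff and abs(e1 - e2) <= max_diff
--                     and label[i] != label[j]):
--                 li, lj = label[i], label[j]
--                 label = [lj if l == li else l for l in label]
--     groups = []
--     for v in range(n):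
--         if all(label[u] != label[v] for u in range(v)):
--             groups.append({u for u in range(n) if label[u] == label[v]})
--     return groups
-- ===== Notes on version B (the rewrite author's own statement) =====
-- stated objective: alternative
-- what changed: A's union-find with path compression plus a defaultdict-of-sets collection pass is replaced by a quick-find flat label array that is relabelled wholesale on each merge, with the groups read off the labels directly in order of minimal index; the sorted sweep that enumerates candidate pairs is kept.
import Mathlib
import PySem

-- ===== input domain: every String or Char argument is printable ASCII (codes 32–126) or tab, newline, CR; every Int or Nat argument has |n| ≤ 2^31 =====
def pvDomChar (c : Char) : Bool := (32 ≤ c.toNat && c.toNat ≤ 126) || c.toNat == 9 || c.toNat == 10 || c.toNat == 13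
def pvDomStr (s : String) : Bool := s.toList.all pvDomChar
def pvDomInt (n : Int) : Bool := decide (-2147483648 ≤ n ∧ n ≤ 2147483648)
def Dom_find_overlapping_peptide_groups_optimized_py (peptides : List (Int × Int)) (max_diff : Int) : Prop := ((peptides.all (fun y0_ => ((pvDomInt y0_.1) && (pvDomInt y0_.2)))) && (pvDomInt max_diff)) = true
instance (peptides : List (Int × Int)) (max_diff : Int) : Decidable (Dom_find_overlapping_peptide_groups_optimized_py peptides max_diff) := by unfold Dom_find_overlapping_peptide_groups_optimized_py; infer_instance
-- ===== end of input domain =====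

-- B replaces A's union-find-with-path-compression + defaultdict grouping by a flat
-- quick-find label array relabelled on each merge, reading the groups off the labels
-- in order of minimal index (objective: alternative; same sweep, no speed claim).

-- ===== PORT A =====
-- parent[x] (indices are always in range when A runs)
def ufGet (p : List Int) (x : Int) : Int := PySem.List.pyGetD p x 0

-- `find` with path compression; recursion depth in Python is bounded by the number of
-- nodes, so a fuel of n (passed at every call site) makes the same computation total.
def pyFind (p : List Int) (x : Int) : Nat → List Int × Int
  | 0 => (p, x)
  | fuel+1 =>
    if ufGet p x = x then (p, x)
    else
      let r := pyFind p (ufGet p x) fuel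
      (PySem.List.pySetD r.1 x r.2, r.2)

-- `union`: px, py = find(x), find(y); if px != py: parent[px] = py
def pyUnion (p : List Int) (x y : Int) (fuel : Nat) : List Int :=
  let fx := pyFind p x fuel
  let fy := pyFind fx.1 y fuel
  if fx.2 ≠ fy.2 then PySem.List.pySetD fy.1 fx.2 fy.2 else fy.1

-- inner `for j in range(i+1, n)` loop with its break
def innerA (d s1 e1 i1 : Int) (fuel : Nat) : List Int → List (Int × Int × Int) → List Int
  | p, [] => p
  | p, (s2, e2, i2) :: rest =>
    if e1 + d < s2 then p
    else innerA d s1 e1 i1 fuel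
      (if |s1 - s2| ≤ d ∧ |e1 - e2| ≤ d then pyUnion p i1 i2 fuel else p) rest

-- outer `for i in range(n)` loop
def outerA (d : Int) (fuel : Nat) : List Int → List (Int × Int × Int) → List Int
  | p, [] => p
  | p, (s1, e1, i1) :: rest => outerA d fuel (innerA d s1 e1 i1 fuel p rest) rest

def find_overlapping_peptide_groups_optimized_py (peptides : List (Int × Int)) (max_diff : Int) : List (List Int) :=
  let n := peptides.length
  if n = 0 then []
  else
    -- indexed_peptides.sort(): lexicographic sort of (start, end, idx) triples; since the
    -- idx components are distinct and increasing, this is the stable sort by (start, end).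
    let indexed := PySem.List.sorted2 ((PySem.List.enumerate peptides).map (fun q => (q.2.1, q.2.2, q.1))) (fun t => t.1) (fun t => t.2.1) false
    let parent := outerA max_diff n (PySem.List.pyRange 0 (n : Int) 1) indexed
    -- groups_dict = defaultdict(set); for i in range(n): groups_dict[find(i)].add(i)
    let fin := (PySem.List.pyRange 0 (n : Int) 1).foldl (fun st i =>
      let f := pyFind st.1 i n
      (f.1, PySem.Dict.modify st.2 f.2 PySem.Set.empty (fun s => PySem.Set.add s i))) (parent, PySem.Dict.empty)
    PySem.Dict.values fin.2

-- ===== PORT B =====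
-- label = [lj if l == li else l for l in label]
def relabelB (lbl : List Int) (li lj : Int) : List Int := lbl.map (fun l => if l = li then lj else l)

-- inner `for b in range(a+1, n)` loop with its break
def innerB (d : Int) (peptides : List (Int × Int)) (s1 e1 i : Int) : List Int → List Int → List Int
  | lbl, [] => lbl
  | lbl, j :: rest =>
    let q := PySem.List.pyGetD peptides j (0, 0)
    if e1 + d < q.1 then lbl
    else innerB d peptides s1 e1 i
      (if |s1 - q.1| ≤ d ∧ |e1 - q.2| ≤ d ∧ PySem.List.pyGetD lbl i 0 ≠ PySem.List.pyGetD lbl j 0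
       then relabelB lbl (PySem.List.pyGetD lbl i 0) (PySem.List.pyGetD lbl j 0)
       else lbl) rest

-- outer `for a in range(n)` loop
def outerB (d : Int) (peptides : List (Int × Int)) : List Int → List Int → List Int
  | lbl, [] => lbl
  | lbl, i :: rest =>
    let q := PySem.List.pyGetD peptides i (0, 0)
    outerB d peptides (innerB d peptides q.1 q.2 i lbl rest) rest

def find_overlapping_peptide_groups_optimized_py_alt (peptides : List (Int × Int)) (max_diff : Int) : List (List Int) :=
  let n := peptides.length
  -- sorted(range(n), key=lambda k: peptides[k]) — stable sort by the (start, end) pair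
  let order := PySem.List.sorted2 (PySem.List.pyRange 0 (n : Int) 1)
    (fun k => (PySem.List.pyGetD peptides k (0, 0)).1) (fun k => (PySem.List.pyGetD peptides k (0, 0)).2) false
  let lbl := outerB max_diff peptides (PySem.List.pyRange 0 (n : Int) 1) order
  (PySem.List.pyRange 0 (n : Int) 1).foldl (fun acc v =>
    if (PySem.List.pyRange 0 v 1).all (fun u => !(PySem.List.pyGetD lbl u 0 == PySem.List.pyGetD lbl v 0))
    then acc ++ [PySem.Set.ofList ((PySem.List.pyRange 0 (n : Int) 1).filter (fun u => PySem.List.pyGetD lbl u 0 == PySem.List.pyGetD lbl v 0))]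
    else acc) []

-- ===== PRECONDITION & SPEC =====
def Spec_find_overlapping_peptide_groups_optimized_py (peptides : List (Int × Int)) (max_diff : Int) (out : List (List Int)) : Prop := out = find_overlapping_peptide_groups_optimized_py_alt peptides max_diff
instance (peptides : List (Int × Int)) (max_diff : Int) (out : List (List Int)) : Decidable (Spec_find_overlapping_peptide_groups_optimized_py peptides max_diff out) := by unfold Spec_find_overlapping_peptide_groups_optimized_py; infer_instance

-- ===== CLAIM (what is proved, stated in full; the proofs are below) =====
def Claim_equal_find_overlapping_peptide_groups_optimized_py : Prop := ∀ (peptides : List (Int × Int)) (max_diff : Int), Dom_find_overlapping_peptide_groups_optimized_py peptides max_diff → Spec_find_overlapping_peptide_groups_optimized_py peptides max_diff (find_overlapping_peptide_groups_optimized_py peptides max_diff)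

-- ===== LEMMAS AND PROOFS =====

-- x is in bounds for an n-element array
def inb (n : Nat) (x : Int) : Prop := 0 ≤ x ∧ x < (n : Int)

-- k-fold parent step
def ufStepN (p : List Int) : Nat → Int → Int
  | 0, x => x
  | k+1, x => ufStepN p k (ufGet p x)

def IsRootU (p : List Int) (x : Int) : Prop := ufGet p x = x

-- from x, a fixpoint of the parent map is reached within k steps
def DistLe (p : List Int) (k : Nat) (x : Int) : Prop := IsRootU p (ufStepN p k x)

def rootU (p : List Int) (x : Int) : Int := ufStepN p p.length x

-- number of non-root nodes
def nonroots (p : List Int) : Nat :=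
  (List.range p.length).countP (fun t : Nat => !(decide (ufGet p (t : Int) = (t : Int))))

-- the simulation invariant: the union-find forest `p` and the label array `lbl`
-- induce the same partition of {0, …, n-1}
structure UFInv (n : Nat) (p lbl : List Int) : Prop where
  plen : p.length = n
  llen : lbl.length = n
  pin : ∀ x : Int, inb n x → inb n (ufGet p x)
  lstep : ∀ x : Int, inb n x → ufGet lbl (ufGet p x) = ufGet lbl x
  uniq : ∀ x y : Int, inb n x → inb n y → IsRootU p x → IsRootU p y →
    ufGet lbl x = ufGet lbl y → x = y
  dist : ∀ x : Int, inb n x → DistLe p (nonroots p) x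

-- ---------- basic facts ----------

lemma ufGet_pySetD (p : List Int) (i v y : Int) (h0 : 0 ≤ i) (hl : i < p.length) (hy : 0 ≤ y) :
    ufGet (PySem.List.pySetD p i v) y = if y = i then v else ufGet p y := by
  have hil : i.toNat < p.length := by omega
  rw [PySem.List.pySetD_of_nonneg _ _ h0]
  by_cases hyi : y = i
  · subst hyi
    rw [if_pos rfl, ufGet, PySem.List.pyGetD_of_nonneg _ _ hy, List.getD_eq_getElem?_getD,
      List.getElem?_set_self hil]
    rfl
  · rw [if_neg hyi, ufGet, ufGet, PySem.List.pyGetD_of_nonneg _ _ hy,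
      PySem.List.pyGetD_of_nonneg _ _ hy, List.getD_eq_getElem?_getD, List.getD_eq_getElem?_getD,
      List.getElem?_set_ne (by omega)]

lemma ufStepN_succ_right (p : List Int) (k : Nat) (x : Int) :
    ufStepN p (k+1) x = ufGet p (ufStepN p k x) := by
  induction k generalizing x with
  | zero => rfl
  | succ k ih =>
    show ufStepN p (k+1) (ufGet p x) = _
    rw [ih (ufGet p x)]
    rfl

lemma ufStepN_add (p : List Int) (a b : Nat) (x : Int) :
    ufStepN p (a + b) x = ufStepN p b (ufStepN p a x) := by
  induction a generalizing x with
  | zero => rw [Nat.zero_add]; rfl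
  | succ a ih =>
    have : a + 1 + b = (a + b) + 1 := by omega
    rw [this]
    show ufStepN p (a+b) (ufGet p x) = _
    rw [ih (ufGet p x)]
    rfl

lemma ufStepN_root (p : List Int) (k : Nat) (z : Int) (hz : IsRootU p z) : ufStepN p k z = z := by
  induction k with
  | zero => rfl
  | succ k ih =>
    show ufStepN p k (ufGet p z) = z
    rw [hz]; exact ih

lemma distLe_mono (p : List Int) (k m : Nat) (x : Int) (h : DistLe p k x) (hkm : k ≤ m) :
    DistLe p m x := by
  have : m = k + (m - k) := by omega
  rw [DistLe, this, ufStepN_add, ufStepN_root _ _ _ h]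
  exact h

lemma reach_unique (p : List Int) (m m' : Nat) (x : Int)
    (h : IsRootU p (ufStepN p m x)) (h' : IsRootU p (ufStepN p m' x)) :
    ufStepN p m x = ufStepN p m' x := by
  rcases le_total m m' with hle | hle
  · have : m' = m + (m' - m) := by omega
    rw [this, ufStepN_add, ufStepN_root _ _ _ h]
  · have : m = m' + (m - m') := by omega
    rw [this, ufStepN_add, ufStepN_root _ _ _ h']

lemma nonroots_le (p : List Int) : nonroots p ≤ p.length := by
  have h := List.countP_le_length (p := fun t : Nat => !(decide (ufGet p (t:Int) = (t:Int)))) (l := List.range p.length)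
  simpa [nonroots] using h

lemma stepN_inb {n : Nat} {p lbl : List Int} (hI : UFInv n p lbl) (k : Nat) (x : Int)
    (hx : inb n x) : inb n (ufStepN p k x) := by
  induction k generalizing x with
  | zero => exact hx
  | succ k ih => exact ih _ (hI.pin x hx)

lemma lbl_stepN {n : Nat} {p lbl : List Int} (hI : UFInv n p lbl) (k : Nat) (x : Int)
    (hx : inb n x) : ufGet lbl (ufStepN p k x) = ufGet lbl x := by
  induction k generalizing x with
  | zero => rfl
  | succ k ih =>
    show ufGet lbl (ufStepN p k (ufGet p x)) = _
    rw [ih _ (hI.pin x hx), hI.lstep x hx]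

lemma rootU_isRoot {n : Nat} {p lbl : List Int} (hI : UFInv n p lbl) (x : Int) (hx : inb n x) :
    IsRootU p (rootU p x) :=
  distLe_mono p (nonroots p) p.length x (hI.dist x hx) (nonroots_le p)

lemma rootU_inb {n : Nat} {p lbl : List Int} (hI : UFInv n p lbl) (x : Int) (hx : inb n x) :
    inb n (rootU p x) := stepN_inb hI _ x hx

lemma lbl_rootU {n : Nat} {p lbl : List Int} (hI : UFInv n p lbl) (x : Int) (hx : inb n x) :
    ufGet lbl (rootU p x) = ufGet lbl x := lbl_stepN hI _ x hx

lemma rootU_of_root {n : Nat} {p lbl : List Int} (_hI : UFInv n p lbl) (x : Int)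
    (hx : IsRootU p x) : rootU p x = x := ufStepN_root p _ x hx

lemma rootU_step {n : Nat} {p lbl : List Int} (hI : UFInv n p lbl) (x : Int) (hx : inb n x) :
    rootU p (ufGet p x) = rootU p x := by
  have h1 : rootU p (ufGet p x) = ufStepN p (p.length + 1) x := rfl
  rw [h1, ufStepN_succ_right]
  exact rootU_isRoot hI x hx

lemma rootU_eq_iff {n : Nat} {p lbl : List Int} (hI : UFInv n p lbl) (x y : Int)
    (hx : inb n x) (hy : inb n y) :
    rootU p x = rootU p y ↔ ufGet lbl x = ufGet lbl y := by
  constructor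
  · intro h
    rw [← lbl_rootU hI x hx, ← lbl_rootU hI y hy, h]
  · intro h
    exact hI.uniq (rootU p x) (rootU p y) (rootU_inb hI x hx) (rootU_inb hI y hy)
      (rootU_isRoot hI x hx) (rootU_isRoot hI y hy)
      (by rw [lbl_rootU hI x hx, lbl_rootU hI y hy, h])

lemma nonroots_congr (p q : List Int) (hl : p.length = q.length)
    (h : ∀ y : Int, inb p.length y → (IsRootU p y ↔ IsRootU q y)) :
    nonroots p = nonroots q := by
  rw [nonroots, nonroots, ← hl]
  apply List.countP_congr
  intro t ht
  have htn : t < p.length := by simpa using ht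
  have hiff := h (t : Int) ⟨by exact_mod_cast Nat.zero_le t, by exact_mod_cast htn⟩
  rw [IsRootU, IsRootU] at hiff
  simp only [Bool.not_eq_eq_eq_not, Bool.not_true, decide_eq_false_iff_not]
  tauto

lemma countP_range_update (f g : Nat → Bool) (n j : Nat) (hj : j < n)
    (hag : ∀ i, i < n → i ≠ j → f i = g i) (hfj : f j = false) (hgj : g j = true) :
    (List.range n).countP g = (List.range n).countP f + 1 := by
  induction n with
  | zero => omega
  | succ n ih =>
    rw [List.range_succ, List.countP_append, List.countP_append]
    by_cases hjn : j = n
    · subst hjn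
      have : (List.range j).countP g = (List.range j).countP f := by
        apply List.countP_congr
        intro t ht
        have htj := List.mem_range.mp ht
        rw [hag t (by omega) (by omega)]
      rw [this]
      simp [hfj, hgj]
    · have hjn' : j < n := by omega
      rw [ih hjn' (fun i hi hij => hag i (by omega) hij)]
      have : f n = g n := hag n (by omega) (by omega)
      simp [List.countP_cons, this]
      omega


-- ---------- pointing a non-root at its root (path compression step) ----------
lemma pySetD_compress_spec {n : Nat} {p lbl : List Int} (hI : UFInv n p lbl) (x : Int)
    (hx : inb n x) (hxnr : ¬ IsRootU p x) :
    (∀ y : Int, inb n y → (IsRootU (PySem.List.pySetD p x (rootU p x)) y ↔ IsRootU p y)) ∧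
    nonroots (PySem.List.pySetD p x (rootU p x)) = nonroots p ∧
    (∀ y : Int, inb n y → rootU (PySem.List.pySetD p x (rootU p x)) y = rootU p y) ∧
    UFInv n (PySem.List.pySetD p x (rootU p x)) lbl := by
  set r := rootU p x with hr
  have hrroot : IsRootU p r := rootU_isRoot hI x hx
  have hrinb : inb n r := rootU_inb hI x hx
  have hrx : r ≠ x := fun h => hxnr (h ▸ hrroot)
  have hx' : x < (p.length : Int) := by rw [hI.plen]; exact hx.2
  have hget : ∀ y : Int, 0 ≤ y → ufGet (PySem.List.pySetD p x r) y = if y = x then r else ufGet p y :=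
    fun y hy => ufGet_pySetD p x r y hx.1 hx' hy
  set p' := PySem.List.pySetD p x r with hp'
  have hlen : p'.length = p.length := PySem.List.length_pySetD p x r
  have hroots : ∀ y : Int, inb n y → (IsRootU p' y ↔ IsRootU p y) := by
    intro y hy
    by_cases hyx : y = x
    · subst hyx
      rw [IsRootU, IsRootU, hget y hy.1, if_pos rfl]
      constructor
      · intro h; exact absurd (h ▸ hrroot) hxnr
      · intro h; exact absurd h hxnr
    · rw [IsRootU, IsRootU, hget y hy.1, if_neg hyx]
  have hrroot' : IsRootU p' r := by
    rw [IsRootU, hget r hrinb.1, if_neg hrx]; exact hrroot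
  have hnon : nonroots p' = nonroots p := by
    apply nonroots_congr p' p hlen
    intro y hy
    exact hroots y ⟨hy.1, by rw [hlen, hI.plen] at hy; exact hy.2⟩
  have hdist : ∀ (k : Nat) (y : Int), inb n y → DistLe p k y → DistLe p' k y := by
    intro k
    induction k using Nat.strong_induction_on with
    | _ k ih =>
      intro y hy hd
      by_cases hyx : y = x
      · subst hyx
        have hk1 : 1 ≤ k := by
          rcases Nat.eq_zero_or_pos k with h0 | h
          · rw [h0] at hd; exact absurd hd hxnr
          · exact h
        have hst : ufStepN p' k y = r := by
          have hk : k = 1 + (k - 1) := by omega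
          rw [hk, ufStepN_add]
          have h1 : ufStepN p' 1 y = r := by
            show ufGet p' y = r
            rw [hget y hy.1, if_pos rfl]
          rw [h1, ufStepN_root _ _ _ hrroot']
        rw [DistLe, hst]; exact hrroot'
      · by_cases hyr : IsRootU p y
        · have h' : IsRootU p' y := (hroots y hy).mpr hyr
          rw [DistLe, ufStepN_root _ _ _ h']; exact h'
        · have hk1 : 1 ≤ k := by
            rcases Nat.eq_zero_or_pos k with h0 | h
            · rw [h0] at hd; exact absurd hd hyr
            · exact h
          have hd' : DistLe p (k - 1) (ufGet p y) := by
            have hk : k = (k - 1) + 1 := by omega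
            rw [DistLe] at hd ⊢; rw [hk] at hd; exact hd
          have hrec := ih (k - 1) (by omega) (ufGet p y) (hI.pin y hy) hd'
          have hgy : ufGet p' y = ufGet p y := by rw [hget y hy.1, if_neg hyx]
          have hk : k = (k - 1) + 1 := by omega
          rw [DistLe, hk]
          show IsRootU p' (ufStepN p' (k-1) (ufGet p' y))
          rw [hgy]; exact hrec
  have hreach : ∀ (k : Nat) (y : Int), inb n y → ∃ m : Nat, ufStepN p' k y = ufStepN p m y := by
    intro k y hy
    induction k with
    | zero => exact ⟨0, rfl⟩
    | succ k ih =>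
      obtain ⟨m, hm⟩ := ih
      have hzinb : inb n (ufStepN p m y) := stepN_inb hI m y hy
      rw [ufStepN_succ_right, hm]
      by_cases hz : ufStepN p m y = x
      · refine ⟨m + p.length, ?_⟩
        rw [hget _ hzinb.1, if_pos hz, ufStepN_add, hz]
        rfl
      · refine ⟨m + 1, ?_⟩
        rw [hget _ hzinb.1, if_neg hz, ufStepN_add]
        rfl
  have hInv' : UFInv n p' lbl := by
    refine ⟨hlen.trans hI.plen, hI.llen, ?_, ?_, ?_, ?_⟩
    · intro y hy
      rw [hget y hy.1]
      split
      · exact hrinb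
      · exact hI.pin y hy
    · intro y hy
      rw [hget y hy.1]
      split
      · rename_i hyx; subst hyx; exact lbl_rootU hI y hy
      · exact hI.lstep y hy
    · intro a b ha hb hra hrb hab
      exact hI.uniq a b ha hb ((hroots a ha).mp hra) ((hroots b hb).mp hrb) hab
    · intro y hy
      rw [hnon]
      exact hdist (nonroots p) y hy (hI.dist y hy)
  have hrootU : ∀ y : Int, inb n y → rootU p' y = rootU p y := by
    intro y hy
    obtain ⟨m, hm⟩ := hreach p'.length y hy
    have hw : IsRootU p' (rootU p' y) := rootU_isRoot hInv' y hy
    rw [rootU, hm] at hw ⊢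
    have hwp : IsRootU p (ufStepN p m y) := (hroots _ (stepN_inb hI m y hy)).mp hw
    exact reach_unique p m p.length y hwp (rootU_isRoot hI y hy)
  exact ⟨hroots, hnon, hrootU, hInv'⟩

-- ---------- pyFind specification ----------
lemma pyFind_spec {n : Nat} {lbl : List Int} :
    ∀ (fuel : Nat) (p : List Int) (x : Int) (k : Nat), UFInv n p lbl → inb n x →
    DistLe p k x → k ≤ fuel →
    (pyFind p x fuel).2 = rootU p x ∧
    UFInv n (pyFind p x fuel).1 lbl ∧
    (∀ y : Int, inb n y → (IsRootU (pyFind p x fuel).1 y ↔ IsRootU p y)) ∧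
    (∀ y : Int, inb n y → rootU (pyFind p x fuel).1 y = rootU p y) ∧
    nonroots (pyFind p x fuel).1 = nonroots p := by
  intro fuel
  induction fuel with
  | zero =>
    intro p x k hI hx hd hk
    have hk0 : k = 0 := by omega
    have hroot : IsRootU p x := by rw [hk0] at hd; exact hd
    refine ⟨(rootU_of_root hI x hroot).symm, hI, fun y _ => Iff.rfl, fun y _ => rfl, rfl⟩
  | succ fuel ih =>
    intro p x k hI hx hd hk
    by_cases h : ufGet p x = x
    · have : pyFind p x (fuel+1) = (p, x) := by rw [pyFind, if_pos h]
      rw [this]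
      exact ⟨(rootU_of_root hI x h).symm, hI, fun y _ => Iff.rfl, fun y _ => rfl, rfl⟩
    · have hk1 : 1 ≤ k := by
        rcases Nat.eq_zero_or_pos k with h0 | hp
        · rw [h0] at hd; exact absurd hd h
        · exact hp
      have hd' : DistLe p (k - 1) (ufGet p x) := by
        have hkk : k = (k - 1) + 1 := by omega
        rw [DistLe] at hd ⊢; rw [hkk] at hd; exact hd
      obtain ⟨h2, hI1, hroots1, hrootU1, hnon1⟩ :=
        ih p (ufGet p x) (k - 1) hI (hI.pin x hx) hd' (by omega)
      set q := pyFind p (ufGet p x) fuel with hq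
      have heq : pyFind p x (fuel+1) = (PySem.List.pySetD q.1 x q.2, q.2) := by
        rw [pyFind, if_neg h]
      have hq2 : q.2 = rootU p x := by rw [h2, rootU_step hI x hx]
      have hq2' : q.2 = rootU q.1 x := by rw [hq2, ← hrootU1 x hx]
      have hxnr1 : ¬ IsRootU q.1 x := fun hc => h ((hroots1 x hx).mp hc)
      obtain ⟨croots, cnon, crootU, cInv⟩ := pySetD_compress_spec hI1 x hx hxnr1
      rw [← hq2'] at croots cnon crootU cInv
      rw [heq]
      refine ⟨hq2, cInv, ?_, ?_, ?_⟩
      · intro y hy; exact (croots y hy).trans (hroots1 y hy)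
      · intro y hy; rw [crootU y hy, hrootU1 y hy]
      · rw [cnon, hnon1]

-- ---------- relabelling ----------
lemma length_relabelB (lbl : List Int) (li lj : Int) : (relabelB lbl li lj).length = lbl.length :=
  List.length_map ..

lemma ufGet_relabelB (lbl : List Int) (li lj y : Int) (h0 : 0 ≤ y) (hl : y < lbl.length) :
    ufGet (relabelB lbl li lj) y = if ufGet lbl y = li then lj else ufGet lbl y := by
  have hlt : y < ((relabelB lbl li lj).length : Int) := by rw [length_relabelB]; exact hl
  simp only [ufGet]
  rw [PySem.List.pyGetD_eq_getElem _ _ h0 hlt, PySem.List.pyGetD_eq_getElem lbl _ h0 hl]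
  simp only [relabelB, List.getElem_map]


-- ---------- pointing one root at another (union step) ----------
lemma distLe_pySetD_union {n : Nat} {p lbl : List Int} (hI : UFInv n p lbl) (a b : Int)
    (ha : inb n a) (hb : inb n b) (hra : IsRootU p a) (hrb : IsRootU p b) (hab : b ≠ a) :
    ∀ (k : Nat) (y : Int), inb n y → DistLe p k y →
      DistLe (PySem.List.pySetD p a b) (k+1) y := by
  have ha' : a < (p.length : Int) := by rw [hI.plen]; exact ha.2
  have hget : ∀ y : Int, 0 ≤ y → ufGet (PySem.List.pySetD p a b) y = if y = a then b else ufGet p y :=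
    fun y hy => ufGet_pySetD p a b y ha.1 ha' hy
  set p' := PySem.List.pySetD p a b with hp'
  have hrb' : IsRootU p' b := by
    rw [IsRootU, hget b hb.1, if_neg hab]; exact hrb
  have hroot1 : ∀ y : Int, inb n y → IsRootU p y → DistLe p' 1 y := by
    intro y hy hd
    by_cases hya : y = a
    · subst hya
      rw [DistLe]
      show IsRootU p' (ufGet p' y)
      rw [hget y hy.1, if_pos rfl]
      exact hrb'
    · have h' : IsRootU p' y := by rw [IsRootU, hget y hy.1, if_neg hya]; exact hd
      rw [DistLe]
      show IsRootU p' (ufGet p' y)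
      rw [hget y hy.1, if_neg hya, hd]
      exact h'
  intro k
  induction k with
  | zero => exact fun y hy hd => hroot1 y hy hd
  | succ k ih =>
    intro y hy hd
    by_cases hyr : IsRootU p y
    · exact distLe_mono p' 1 (k+2) y (hroot1 y hy hyr) (by omega)
    · have hya : y ≠ a := fun h => hyr (h ▸ hra)
      have hd' : DistLe p k (ufGet p y) := by
        rw [DistLe] at hd ⊢; exact hd
      have hrec := ih (ufGet p y) (hI.pin y hy) hd'
      rw [DistLe]
      show IsRootU p' (ufStepN p' (k+1) (ufGet p' y))
      rw [hget y hy.1, if_neg hya]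
      exact hrec


lemma nonroots_pySetD_succ {n : Nat} {p lbl : List Int} (hI : UFInv n p lbl) (a b : Int)
    (ha : inb n a) (hra : IsRootU p a) (hab : b ≠ a) :
    nonroots (PySem.List.pySetD p a b) = nonroots p + 1 := by
  obtain ⟨ha0, ha2⟩ := ha
  have hpl := hI.plen
  have ha' : a < (p.length : Int) := by omega
  have hget : ∀ y : Int, 0 ≤ y → ufGet (PySem.List.pySetD p a b) y = if y = a then b else ufGet p y :=
    fun y hy => ufGet_pySetD p a b y ha0 ha' hy
  have hra' : ufGet p a = a := hra
  have hlen : (PySem.List.pySetD p a b).length = p.length := PySem.List.length_pySetD p a b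
  have hcast : ((a.toNat : Nat) : Int) = a := by omega
  rw [nonroots, nonroots, hlen]
  apply countP_range_update _ _ p.length a.toNat (by omega)
  · intro t ht htj
    have hta : (t : Int) ≠ a := by omega
    simp only [hget (t : Int) (by positivity), if_neg hta]
  · show (!(decide (ufGet p ((a.toNat : Nat) : Int) = ((a.toNat : Nat) : Int)))) = false
    rw [hcast, hra']
    simp
  · show (!(decide (ufGet (PySem.List.pySetD p a b) ((a.toNat : Nat) : Int) = ((a.toNat : Nat) : Int)))) = true
    rw [hcast, hget a ha0, if_pos rfl]
    simp [hab]

-- ---------- pyUnion specification ----------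
lemma pyUnion_spec {n : Nat} {p lbl : List Int} (hI : UFInv n p lbl) (i j : Int)
    (hi : inb n i) (hj : inb n j) :
    UFInv n (pyUnion p i j n)
      (if ufGet lbl i = ufGet lbl j then lbl
       else relabelB lbl (ufGet lbl i) (ufGet lbl j)) := by
  have hk1 : nonroots p ≤ n := by rw [← hI.plen]; exact nonroots_le p
  obtain ⟨h2i, hI1, hroots1, hrootU1, hnon1⟩ :=
    pyFind_spec n p i (nonroots p) hI hi (hI.dist i hi) hk1
  set q1 := pyFind p i n with hq1
  have hk2 : nonroots q1.1 ≤ n := by rw [← hI1.plen]; exact nonroots_le q1.1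
  obtain ⟨h2j, hI2, hroots2, hrootU2, hnon2⟩ :=
    pyFind_spec n q1.1 j (nonroots q1.1) hI1 hj (hI1.dist j hj) hk2
  set q2 := pyFind q1.1 j n with hq2
  have hpx : q1.2 = rootU p i := h2i
  have hpy : q2.2 = rootU p j := by rw [h2j, hrootU1 j hj]
  set px := q1.2 with hpxd
  set py := q2.2 with hpyd
  have hpxinb : inb n px := hpx ▸ rootU_inb hI i hi
  have hpyinb : inb n py := hpy ▸ rootU_inb hI j hj
  have hpxroot2 : IsRootU q2.1 px :=
    (hroots2 px hpxinb).mpr ((hroots1 px hpxinb).mpr (hpx ▸ rootU_isRoot hI i hi))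
  have hpyroot2 : IsRootU q2.1 py :=
    (hroots2 py hpyinb).mpr ((hroots1 py hpyinb).mpr (hpy ▸ rootU_isRoot hI j hj))
  have hLpx : ufGet lbl px = ufGet lbl i := hpx ▸ lbl_rootU hI i hi
  have hLpy : ufGet lbl py = ufGet lbl j := hpy ▸ lbl_rootU hI j hj
  have hpu : pyUnion p i j n = if px ≠ py then PySem.List.pySetD q2.1 px py else q2.1 := rfl
  by_cases hll : ufGet lbl i = ufGet lbl j
  · have hpxy : px = py := by
      rw [hpx, hpy]
      exact (rootU_eq_iff hI i j hi hj).mpr hll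
    rw [if_pos hll, hpu, if_neg (by simpa using hpxy)]
    exact hI2
  · have hpxy : px ≠ py := by
      rw [hpx, hpy]
      intro hc
      exact hll ((rootU_eq_iff hI i j hi hj).mp hc)
    rw [if_neg hll, hpu, if_pos hpxy]
    set li := ufGet lbl i with hli
    set lj := ufGet lbl j with hlj
    set lbl' := relabelB lbl li lj with hlbl'
    set p3 := PySem.List.pySetD q2.1 px py with hp3
    have hpx' : px < (q2.1.length : Int) := by rw [hI2.plen]; exact hpxinb.2
    have hget3 : ∀ y : Int, 0 ≤ y → ufGet p3 y = if y = px then py else ufGet q2.1 y :=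
      fun y hy => ufGet_pySetD q2.1 px py y hpxinb.1 hpx' hy
    have relget : ∀ y : Int, inb n y →
        ufGet lbl' y = if ufGet lbl y = li then lj else ufGet lbl y := by
      intro y hy
      exact ufGet_relabelB lbl li lj y hy.1 (by rw [hI.llen]; exact hy.2)
    have hroots3 : ∀ z : Int, inb n z → (IsRootU p3 z ↔ (IsRootU q2.1 z ∧ z ≠ px)) := by
      intro z hz
      by_cases hzx : z = px
      · rw [hzx, IsRootU, hget3 px hpxinb.1, if_pos rfl]
        constructor
        · intro h; exact absurd h.symm hpxy
        · intro h; exact absurd rfl h.2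
      · rw [IsRootU, IsRootU, hget3 z hz.1, if_neg hzx]
        exact ⟨fun h => ⟨h, hzx⟩, fun h => h.1⟩
    have hlive : ∀ z : Int, inb n z → IsRootU q2.1 z → z ≠ px → ufGet lbl z ≠ li := by
      intro z hz hzr hzx hc
      exact hzx (hI2.uniq z px hz hpxinb hzr hpxroot2 (by rw [hc, hLpx]))
    refine ⟨?_, ?_, ?_, ?_, ?_, ?_⟩
    · rw [hp3, PySem.List.length_pySetD]; exact hI2.plen
    · rw [hlbl', length_relabelB]; exact hI.llen
    · intro y hy
      rw [hget3 y hy.1]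
      split
      · exact hpyinb
      · exact hI2.pin y hy
    · intro y hy
      rw [hget3 y hy.1]
      by_cases hyx : y = px
      · rw [if_pos hyx]
        rw [relget py hpyinb, relget y hy, hLpy, hyx, hLpx]
        have hji : lj ≠ li := fun h => hll h.symm
        rw [if_neg hji, if_pos rfl]
      · rw [if_neg hyx]
        have hz := hI2.lstep y hy
        rw [relget _ (hI2.pin y hy), relget y hy, hz]
    · intro a b ha hb hra hrb hab
      obtain ⟨hra2, hapx⟩ := (hroots3 a ha).mp hra
      obtain ⟨hrb2, hbpx⟩ := (hroots3 b hb).mp hrb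
      have hLa : ufGet lbl' a = ufGet lbl a := by
        rw [relget a ha, if_neg (hlive a ha hra2 hapx)]
      have hLb : ufGet lbl' b = ufGet lbl b := by
        rw [relget b hb, if_neg (hlive b hb hrb2 hbpx)]
      rw [hLa, hLb] at hab
      exact hI2.uniq a b ha hb hra2 hrb2 hab
    · intro y hy
      have hnon3 : nonroots p3 = nonroots q2.1 + 1 :=
        nonroots_pySetD_succ hI2 px py hpxinb hpxroot2 (fun h => hpxy h.symm)
      rw [hnon3]
      exact distLe_pySetD_union hI2 px py hpxinb hpyinb hpxroot2 hpyroot2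
        (fun h => hpxy h.symm) (nonroots q2.1) y hy (hI2.dist y hy)


-- ---------- loop simulation ----------
lemma simInner {n : Nat} (d s1 e1 : Int) (peptides : List (Int × Int)) (i : Int)
    (hi : inb n i) :
    ∀ (rest : List Int) (p lbl : List Int), UFInv n p lbl → (∀ j ∈ rest, inb n j) →
    UFInv n
      (innerA d s1 e1 i n p (rest.map (fun j =>
        ((PySem.List.pyGetD peptides j (0,0)).1, (PySem.List.pyGetD peptides j (0,0)).2, j))))
      (innerB d peptides s1 e1 i lbl rest) := by
  intro rest
  induction rest with
  | nil => intro p lbl hI _; exact hI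
  | cons j rest ih =>
    intro p lbl hI hmem
    have hj : inb n j := hmem j (List.mem_cons_self ..)
    simp only [List.map_cons, innerA, innerB]
    by_cases hbr : e1 + d < (PySem.List.pyGetD peptides j (0,0)).1
    · rw [if_pos hbr, if_pos hbr]
      exact hI
    · rw [if_neg hbr, if_neg hbr]
      by_cases hc : |s1 - (PySem.List.pyGetD peptides j (0,0)).1| ≤ d ∧
          |e1 - (PySem.List.pyGetD peptides j (0,0)).2| ≤ d
      · have hstep := pyUnion_spec hI i j hi hj
        simp only [ufGet] at hstep
        by_cases hne : PySem.List.pyGetD lbl i 0 ≠ PySem.List.pyGetD lbl j 0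
        · rw [if_pos hc, if_pos ⟨hc.1, hc.2, hne⟩]
          apply ih _ _ _ (fun x hx => hmem x (List.mem_cons_of_mem _ hx))
          rw [if_neg hne] at hstep
          exact hstep
        · rw [if_pos hc, if_neg (fun h => hne h.2.2)]
          apply ih _ _ _ (fun x hx => hmem x (List.mem_cons_of_mem _ hx))
          rw [if_pos (by simpa using hne)] at hstep
          exact hstep
      · rw [if_neg hc, if_neg (fun h => hc ⟨h.1, h.2.1⟩)]
        exact ih _ _ hI (fun x hx => hmem x (List.mem_cons_of_mem _ hx))

lemma simOuter {n : Nat} (d : Int) (peptides : List (Int × Int)) :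
    ∀ (rest : List Int) (p lbl : List Int), UFInv n p lbl → (∀ j ∈ rest, inb n j) →
    UFInv n
      (outerA d n p (rest.map (fun j =>
        ((PySem.List.pyGetD peptides j (0,0)).1, (PySem.List.pyGetD peptides j (0,0)).2, j))))
      (outerB d peptides lbl rest) := by
  intro rest
  induction rest with
  | nil => intro p lbl hI _; exact hI
  | cons i rest ih =>
    intro p lbl hI hmem
    have hi : inb n i := hmem i (List.mem_cons_self ..)
    simp only [List.map_cons, outerA, outerB]
    exact ih _ _
      (simInner d (PySem.List.pyGetD peptides i (0,0)).1 (PySem.List.pyGetD peptides i (0,0)).2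
        peptides i hi rest p lbl hI (fun x hx => hmem x (List.mem_cons_of_mem _ hx)))
      (fun x hx => hmem x (List.mem_cons_of_mem _ hx))


-- ---------- the two sorts produce corresponding lists ----------
lemma insertBy_map {α β : Type} (f : α → β) (bf : β → β → Bool) (b : α → α → Bool)
    (hb : ∀ a c : α, bf (f a) (f c) = b a c) (x : α) :
    ∀ acc : List α, PySem.List.insertBy bf (f x) (acc.map f) = (PySem.List.insertBy b x acc).map f := by
  intro acc
  induction acc with
  | nil => simp [PySem.List.insertBy]
  | cons y ys ih =>
    simp only [List.map_cons, PySem.List.insertBy, hb x y]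
    by_cases h : b x y
    · rw [if_pos h, if_pos h]
      simp
    · rw [if_neg h, if_neg h]
      simp only [List.map_cons, List.cons.injEq, true_and]
      exact ih

lemma foldl_insertBy_map {α β : Type} (f : α → β) (bf : β → β → Bool) (b : α → α → Bool)
    (hb : ∀ a c : α, bf (f a) (f c) = b a c) :
    ∀ (xs acc : List α),
      (xs.map f).foldl (fun a x => PySem.List.insertBy bf x a) (acc.map f)
        = (xs.foldl (fun a x => PySem.List.insertBy b x a) acc).map f := by
  intro xs
  induction xs with
  | nil => intro acc; rfl
  | cons x xs ih =>
    intro acc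
    simp only [List.map_cons, List.foldl_cons]
    rw [insertBy_map f bf b hb x acc]
    exact ih _

lemma sorted2_map {α β : Type} (f : α → β) (k1 k2 : β → Int) (xs : List α) :
    PySem.List.sorted2 (xs.map f) k1 k2 false
      = (PySem.List.sorted2 xs (fun a => k1 (f a)) (fun a => k2 (f a)) false).map f :=
  foldl_insertBy_map f
    (fun a c => decide (k1 a < k1 c) || (!decide (k1 c < k1 a) && decide (k2 a < k2 c)))
    (fun a c => decide (k1 (f a) < k1 (f c)) || (!decide (k1 (f c) < k1 (f a)) && decide (k2 (f a) < k2 (f c))))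
    (fun _ _ => rfl) xs []


-- ---------- extraction ----------
-- indices that open a new group (no earlier index in the same class)
def firsts (r : Int -> Int) (m : Int) : List Int :=
  (PySem.List.pyRange 0 m 1).filter (fun v => decide (forall u, u ∈ PySem.List.pyRange 0 v 1 -> r u ≠ r v))

def gitems (r : Int -> Int) (m : Int) : List (Int × List Int) :=
  (firsts r m).map (fun v => (r v, (PySem.List.pyRange 0 m 1).filter (fun u => r u == r v)))

lemma mem_firsts (r : Int -> Int) (m v : Int) :
    v ∈ firsts r m ↔ (0 ≤ v ∧ v < m ∧ ∀ u : Int, 0 ≤ u → u < v → r u ≠ r v) := by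
  simp only [firsts, List.mem_filter, PySem.List.mem_pyRange_one, decide_eq_true_eq]
  constructor
  · rintro ⟨⟨h0, h1⟩, h2⟩
    exact ⟨h0, h1, fun u hu0 hu1 => h2 u ⟨hu0, hu1⟩⟩
  · rintro ⟨h0, h1, h2⟩
    exact ⟨⟨h0, h1⟩, fun u hu => h2 u hu.1 hu.2⟩

lemma firsts_nodup (r : Int -> Int) (m : Int) : (firsts r m).Nodup :=
  (PySem.List.nodup_pyRange_one 0 m).filter _

lemma firsts_ne (r : Int -> Int) (m : Int) :
    ∀ v ∈ firsts r m, ∀ w ∈ firsts r m, r v = r w → v = w := by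
  intro v hv w hw hr
  obtain ⟨hv0, hv1, hv2⟩ := (mem_firsts r m v).mp hv
  obtain ⟨hw0, hw1, hw2⟩ := (mem_firsts r m w).mp hw
  rcases lt_trichotomy v w with h | h | h
  · exact absurd hr (hw2 v hv0 h)
  · exact h
  · exact absurd hr.symm (hv2 w hw0 h)

lemma exists_first (r : Int -> Int) (i : Int) :
    ∀ u : Int, 0 ≤ u → u < i → r u = r i → ∃ v ∈ firsts r i, r v = r i := by
  have H : ∀ (k : Nat) (u : Int), u.toNat = k → 0 ≤ u → u < i → r u = r i →
      ∃ v ∈ firsts r i, r v = r i := by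
    intro k
    induction k using Nat.strong_induction_on with
    | _ k ih =>
      intro u hk hu0 hu1 hru
      by_cases hfir : ∀ w : Int, 0 ≤ w → w < u → r w ≠ r u
      · exact ⟨u, (mem_firsts r i u).mpr ⟨hu0, hu1, fun w hw0 hw1 hc => hfir w hw0 hw1 (by rw [hc, hru])⟩, hru⟩
      · push Not at hfir
        obtain ⟨w, hw0, hw1, hrw⟩ := hfir
        exact ih w.toNat (by omega) w rfl hw0 (by omega) (by rw [hrw, hru])
  exact fun u => H u.toNat u rfl

lemma keys_gitems (r : Int -> Int) (i : Int) :
    (PySem.Dict.mk (gitems r i)).keys = (firsts r i).map r := by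
  rw [PySem.Dict.keys_mk, gitems, List.map_map]
  rfl

lemma keys_gitems_nodup (r : Int -> Int) (i : Int) :
    (PySem.Dict.mk (gitems r i)).keys.Nodup := by
  rw [keys_gitems]
  exact List.Nodup.map_on (fun x hx y hy h => firsts_ne r i x hx y hy h) (firsts_nodup r i)

lemma contains_gitems (r : Int -> Int) (i : Int) :
    (PySem.Dict.mk (gitems r i)).contains (r i)
      = decide (∃ u ∈ PySem.List.pyRange 0 i 1, r u = r i) := by
  rw [PySem.Dict.contains_eq_decide_mem_keys, keys_gitems]
  apply decide_eq_decide.mpr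
  constructor
  · intro h
    obtain ⟨v, hv, hrv⟩ := List.mem_map.mp h
    obtain ⟨hv0, hv1, _⟩ := (mem_firsts r i v).mp hv
    exact ⟨v, PySem.List.mem_pyRange_one.mpr ⟨hv0, hv1⟩, hrv⟩
  · rintro ⟨u, hu, hru⟩
    obtain ⟨hu0, hu1⟩ := PySem.List.mem_pyRange_one.mp hu
    obtain ⟨v, hv, hrv⟩ := exists_first r i u hu0 hu1 hru
    exact List.mem_map.mpr ⟨v, hv, hrv⟩


lemma getD_gitems (r : Int -> Int) (i v0 : Int) (hv0 : v0 ∈ firsts r i) (hrv0 : r v0 = r i) :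
    (PySem.Dict.mk (gitems r i)).getD (r i) PySem.Set.empty
      = (PySem.List.pyRange 0 i 1).filter (fun u => r u == r v0) := by
  have hpair : ((r i, (PySem.List.pyRange 0 i 1).filter (fun u => r u == r v0)) : Int × List Int)
      ∈ (PySem.Dict.mk (gitems r i)).items := by
    show _ ∈ gitems r i
    rw [gitems]
    refine List.mem_map.mpr ⟨v0, hv0, ?_⟩
    rw [hrv0]
  exact PySem.Dict.getD_of_mem_items _ hpair (keys_gitems_nodup r i) _

lemma gitems_step (r : Int -> Int) (i : Int) (hi : 0 ≤ i) :
    (PySem.Dict.mk (gitems r i)).insert (r i)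
      (PySem.Set.add ((PySem.Dict.mk (gitems r i)).getD (r i) PySem.Set.empty) i)
    = PySem.Dict.mk (gitems r (i+1)) := by
  have hsplit : PySem.List.pyRange 0 (i+1) 1 = PySem.List.pyRange 0 i 1 ++ [i] :=
    PySem.List.pyRange_one_succ_right (a := 0) (b := i) hi
  set d := PySem.Dict.mk (gitems r i) with hd
  set w := PySem.Set.add (d.getD (r i) PySem.Set.empty) i with hw
  have hitems : (d.insert (r i) w) = PySem.Dict.mk ((d.insert (r i) w).items) := rfl
  rw [hitems]
  by_cases hex : ∃ u ∈ PySem.List.pyRange 0 i 1, r u = r i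
  · -- the class of i was seen before: its group gains i, no new group
    obtain ⟨u, hu, hru⟩ := hex
    obtain ⟨hu0, hu1⟩ := PySem.List.mem_pyRange_one.mp hu
    obtain ⟨v0, hv0, hrv0⟩ := exists_first r i u hu0 hu1 hru
    have hcon : d.contains (r i) = true := by
      rw [hd, contains_gitems]
      simp only [decide_eq_true_eq]
      exact ⟨u, hu, hru⟩
    have hgetD : d.getD (r i) PySem.Set.empty
        = (PySem.List.pyRange 0 i 1).filter (fun u => r u == r v0) :=
      getD_gitems r i v0 hv0 hrv0
    have hnotmem : i ∉ (PySem.List.pyRange 0 i 1).filter (fun u => r u == r v0) := by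
      intro hc
      have := PySem.List.mem_pyRange_one.mp (List.mem_of_mem_filter hc)
      omega
    have hwval : w = (PySem.List.pyRange 0 i 1).filter (fun u => r u == r v0) ++ [i] := by
      rw [hw, hgetD, PySem.Set.add_of_not_mem hnotmem]
    have hfirsts : firsts r (i+1) = firsts r i := by
      rw [firsts, hsplit, List.filter_append, firsts]
      have : ([i].filter (fun v => decide (forall u, u ∈ PySem.List.pyRange 0 v 1 -> r u ≠ r v))) = [] := by
        rw [List.filter_singleton]
        have hdec : (decide (forall u, u ∈ PySem.List.pyRange 0 i 1 -> r u ≠ r i)) = false := by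
          simp only [decide_eq_false_iff_not]
          intro hall
          exact hall u hu hru
        rw [hdec]
        rfl
      rw [this, List.append_nil]
    rw [PySem.Dict.items_insert_of_contains d w hcon]
    show PySem.Dict.mk ((gitems r i).map _) = _
    rw [gitems, gitems, hfirsts, List.map_map]
    congr 1
    apply List.map_congr_left
    intro v hv
    obtain ⟨hvr0, hvr1, _⟩ := (mem_firsts r i v).mp hv
    simp only [Function.comp]
    by_cases hrvi : r v = r i
    · rw [if_pos (by simpa using hrvi)]
      have h1 : (PySem.List.pyRange 0 (i+1) 1).filter (fun u => r u == r v)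
          = (PySem.List.pyRange 0 i 1).filter (fun u => r u == r v) ++ [i] := by
        rw [hsplit, List.filter_append, List.filter_singleton,
          show (r i == r v) = true by simpa using hrvi.symm]
        rfl
      rw [h1, hwval]
      have h2 : (PySem.List.pyRange 0 i 1).filter (fun u => r u == r v0)
          = (PySem.List.pyRange 0 i 1).filter (fun u => r u == r v) := by
        apply List.filter_congr
        intro x _
        rw [hrv0, hrvi]
      rw [h2, hrvi]
    · rw [if_neg (by simpa using hrvi)]
      have h1 : (PySem.List.pyRange 0 (i+1) 1).filter (fun u => r u == r v)
          = (PySem.List.pyRange 0 i 1).filter (fun u => r u == r v) := by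
        rw [hsplit, List.filter_append, List.filter_singleton,
          show (r i == r v) = false by simp only [beq_eq_false_iff_ne, ne_eq]; exact fun h => hrvi h.symm]
        rw [show (cond false [i] [] : List Int) = [] from rfl, List.append_nil]
      rw [h1]
  · -- a brand-new class: a new group [i] is appended
    have hcon : d.contains (r i) = false := by
      rw [hd, contains_gitems]
      simpa using hex
    have hgetD : d.getD (r i) PySem.Set.empty = PySem.Set.empty :=
      PySem.Dict.getD_of_not_contains d _ hcon
    have hwval : w = [i] := by
      rw [hw, hgetD]
      rfl
    have hfirsts : firsts r (i+1) = firsts r i ++ [i] := by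
      rw [firsts, hsplit, List.filter_append, firsts, List.filter_singleton]
      have hdec : (decide (forall u, u ∈ PySem.List.pyRange 0 i 1 -> r u ≠ r i)) = true := by
        simp only [decide_eq_true_eq]
        intro u hu hc
        exact hex ⟨u, hu, hc⟩
      rw [hdec]
      rfl
    rw [PySem.Dict.items_insert_of_not_contains d w hcon]
    show PySem.Dict.mk (gitems r i ++ [(r i, w)]) = _
    rw [hwval, gitems, gitems, hfirsts, List.map_append]
    have hA : (firsts r i).map (fun v => (r v, (PySem.List.pyRange 0 (i+1) 1).filter (fun u => r u == r v)))
        = (firsts r i).map (fun v => (r v, (PySem.List.pyRange 0 i 1).filter (fun u => r u == r v))) := by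
      apply List.map_congr_left
      intro v hv
      obtain ⟨hvr0, hvr1, _⟩ := (mem_firsts r i v).mp hv
      have hne : ¬ (r i == r v) = true := by
        simp only [beq_iff_eq]
        intro hc
        exact hex ⟨v, PySem.List.mem_pyRange_one.mpr ⟨hvr0, hvr1⟩, hc.symm⟩
      rw [hsplit, List.filter_append, List.filter_singleton,
        show (r i == r v) = false by simpa using hne]
      simp
    have hB : ([i] : List Int).map (fun v => (r v, (PySem.List.pyRange 0 (i+1) 1).filter (fun u => r u == r v)))
        = [(r i, [i])] := by
      have h0 : (PySem.List.pyRange 0 i 1).filter (fun u => r u == r i) = [] := by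
        apply List.filter_eq_nil_iff.mpr
        intro u hu
        simp only [beq_iff_eq]
        exact fun hc => hex ⟨u, hu, hc⟩
      simp only [List.map_cons, List.map_nil]
      rw [hsplit, List.filter_append, List.filter_singleton, h0]
      simp
    rw [hA, hB]

-- one step of A's collection loop
def exStep (n : Nat) (st : List Int × PySem.Dict Int (PySem.Set Int)) (i : Int) :
    List Int × PySem.Dict Int (PySem.Set Int) :=
  let f := pyFind st.1 i n
  (f.1, PySem.Dict.modify st.2 f.2 PySem.Set.empty (fun s => PySem.Set.add s i))

lemma extract_inv {n : Nat} {p lbl : List Int} (hI : UFInv n p lbl) :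
    ∀ m : Nat, m ≤ n →
    UFInv n ((PySem.List.pyRange 0 (m:Int) 1).foldl (exStep n) (p, PySem.Dict.empty)).1 lbl ∧
    (∀ x : Int, inb n x →
      rootU ((PySem.List.pyRange 0 (m:Int) 1).foldl (exStep n) (p, PySem.Dict.empty)).1 x = rootU p x) ∧
    ((PySem.List.pyRange 0 (m:Int) 1).foldl (exStep n) (p, PySem.Dict.empty)).2
      = PySem.Dict.mk (gitems (rootU p) (m:Int)) := by
  intro m
  induction m with
  | zero =>
    intro _
    rw [Nat.cast_zero, PySem.List.pyRange_one_eq_nil (le_refl 0)]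
    exact ⟨hI, fun x _ => rfl, rfl⟩
  | succ m ih =>
    intro hm
    obtain ⟨hIm, hrootm, hdm⟩ := ih (by omega)
    have hcast : ((m+1 : Nat) : Int) = (m : Int) + 1 := by push_cast; ring
    have hsplit : PySem.List.pyRange 0 ((m+1 : Nat) : Int) 1
        = PySem.List.pyRange 0 (m : Int) 1 ++ [(m : Int)] := by
      rw [hcast]
      exact PySem.List.pyRange_one_succ_right (a := 0) (b := (m : Int)) (by positivity)
    rw [hsplit, List.foldl_append]
    set st := (PySem.List.pyRange 0 (m:Int) 1).foldl (exStep n) (p, PySem.Dict.empty) with hst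
    have hminb : inb n (m : Int) := ⟨by positivity, by exact_mod_cast hm⟩
    have hkfuel : nonroots st.1 ≤ n := by rw [← hIm.plen]; exact nonroots_le st.1
    obtain ⟨hq2, hIq, _, hrootq, _⟩ :=
      pyFind_spec n st.1 (m : Int) (nonroots st.1) hIm hminb (hIm.dist _ hminb) hkfuel
    have hstep : List.foldl (exStep n) st [(m : Int)]
        = ((pyFind st.1 (m:Int) n).1,
           PySem.Dict.modify st.2 (pyFind st.1 (m:Int) n).2 PySem.Set.empty
             (fun s => PySem.Set.add s (m:Int))) := rfl
    rw [hstep]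
    refine ⟨hIq, ?_, ?_⟩
    · intro x hx
      rw [hrootq x hx, hrootm x hx]
    · have hmod : PySem.Dict.modify st.2 (pyFind st.1 (m:Int) n).2 PySem.Set.empty
          (fun s => PySem.Set.add s (m:Int))
          = st.2.insert (pyFind st.1 (m:Int) n).2
              (PySem.Set.add (st.2.getD (pyFind st.1 (m:Int) n).2 PySem.Set.empty) (m:Int)) := rfl
      have hr : (pyFind st.1 (m:Int) n).2 = rootU p (m:Int) := by
        rw [hq2, hrootm _ hminb]
      rw [hmod, hr, hdm, hcast]
      exact gitems_step (rootU p) (m : Int) (by positivity)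


-- initial state: parent = label = list(range(n)) represent the discrete partition
lemma ufGet_range (n : Nat) (x : Int) (hx : inb n x) :
    ufGet (PySem.List.pyRange 0 (n : Int) 1) x = x := by
  have hlen : (PySem.List.pyRange 0 (n : Int) 1).length = n := by
    rw [PySem.List.length_pyRange_one]
    omega
  have hx2 : x < ((PySem.List.pyRange 0 (n : Int) 1).length : Int) := by
    rw [hlen]; exact hx.2
  obtain ⟨h0x, h1x⟩ := hx
  rw [ufGet, PySem.List.pyGetD_eq_getElem _ _ h0x hx2, PySem.List.getElem_pyRange_one]
  omega

lemma inv_init (n : Nat) :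
    UFInv n (PySem.List.pyRange 0 (n : Int) 1) (PySem.List.pyRange 0 (n : Int) 1) := by
  have hlen : (PySem.List.pyRange 0 (n : Int) 1).length = n := by
    rw [PySem.List.length_pyRange_one]; omega
  have hnon : nonroots (PySem.List.pyRange 0 (n : Int) 1) = 0 := by
    rw [nonroots]
    apply List.countP_eq_zero.mpr
    intro t ht
    have htn : t < n := by rw [← hlen]; simpa using ht
    have := ufGet_range n (t : Int) ⟨by positivity, by exact_mod_cast htn⟩
    simp [this]
  refine ⟨hlen, hlen, ?_, ?_, ?_, ?_⟩
  · intro x hx; rw [ufGet_range n x hx]; exact hx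
  · intro x hx; rw [ufGet_range n x hx, ufGet_range n x hx]
  · intro x y hx hy _ _ hl
    rw [ufGet_range n x hx, ufGet_range n y hy] at hl
    exact hl
  · intro x hx
    rw [hnon]
    exact ufGet_range n x hx

-- ===== VERDICT (by name: the statement is the Claim_ definition above) =====
theorem find_overlapping_peptide_groups_optimized_py_spec : Claim_equal_find_overlapping_peptide_groups_optimized_py := by
  intro peptides max_diff _hdom
  show find_overlapping_peptide_groups_optimized_py peptides max_diff
      = find_overlapping_peptide_groups_optimized_py_alt peptides max_diff
  by_cases hn0 : peptides.length = 0
  · have hnil : peptides = [] := List.length_eq_zero_iff.mp hn0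
    subst hnil
    rfl
  · set n := peptides.length with hn
    simp only [find_overlapping_peptide_groups_optimized_py,
      find_overlapping_peptide_groups_optimized_py_alt]
    rw [if_neg hn0]
    have hsort : PySem.List.sorted2
        ((PySem.List.enumerate peptides).map (fun q => (q.2.1, q.2.2, q.1)))
        (fun t => t.1) (fun t => t.2.1) false
        = (PySem.List.sorted2 (PySem.List.pyRange 0 (n : Int) 1)
            (fun k => (PySem.List.pyGetD peptides k (0, 0)).1)
            (fun k => (PySem.List.pyGetD peptides k (0, 0)).2) false).map
            (fun j => ((PySem.List.pyGetD peptides j (0,0)).1,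
                       (PySem.List.pyGetD peptides j (0,0)).2, j)) := by
      rw [PySem.List.enumerate_eq_map_pyRange peptides (0,0), List.map_map]
      rw [show PySem.List.len peptides = (n : Int) by simp [PySem.List.len_eq, hn]]
      exact sorted2_map (fun j => ((PySem.List.pyGetD peptides j (0,0)).1,
        (PySem.List.pyGetD peptides j (0,0)).2, j)) _ _ _
    rw [hsort]
    set order := PySem.List.sorted2 (PySem.List.pyRange 0 (n : Int) 1)
      (fun k => (PySem.List.pyGetD peptides k (0, 0)).1)
      (fun k => (PySem.List.pyGetD peptides k (0, 0)).2) false with horderdef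
    have hordmem : ∀ j ∈ order, inb n j := by
      intro j hj
      have : j ∈ PySem.List.pyRange 0 (n : Int) 1 :=
        (PySem.List.sorted2_perm _ _ _ _).mem_iff.mp hj
      obtain ⟨h0, h1⟩ := PySem.List.mem_pyRange_one.mp this
      exact ⟨h0, h1⟩
    have hFin : UFInv n
        (outerA max_diff n (PySem.List.pyRange 0 (n : Int) 1)
          (order.map (fun j => ((PySem.List.pyGetD peptides j (0,0)).1,
            (PySem.List.pyGetD peptides j (0,0)).2, j))))
        (outerB max_diff peptides (PySem.List.pyRange 0 (n : Int) 1) order) :=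
      simOuter max_diff peptides order _ _ (inv_init n) hordmem
    set parentA := outerA max_diff n (PySem.List.pyRange 0 (n : Int) 1)
      (order.map (fun j => ((PySem.List.pyGetD peptides j (0,0)).1,
        (PySem.List.pyGetD peptides j (0,0)).2, j))) with hparent
    set lblB := outerB max_diff peptides (PySem.List.pyRange 0 (n : Int) 1) order with hlbl
    obtain ⟨_, _, hdict⟩ := extract_inv hFin n (le_refl n)
    set ρ := rootU parentA with hrho
    have hstepeq : (fun (st : List Int × PySem.Dict Int (PySem.Set Int)) (i : Int) =>
        ((pyFind st.1 i n).1,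
          PySem.Dict.modify st.2 (pyFind st.1 i n).2 PySem.Set.empty
            (fun s => PySem.Set.add s i))) = exStep n := rfl
    rw [hstepeq, hdict]
    have hvalues : (PySem.Dict.mk (gitems ρ (n : Int))).values
        = (firsts ρ (n : Int)).map
            (fun v => (PySem.List.pyRange 0 (n : Int) 1).filter (fun u => ρ u == ρ v)) := by
      rw [PySem.Dict.values_mk, gitems, List.map_map]
      rfl
    rw [hvalues]
    rw [PySem.List.foldl_append_if
      (fun v => (PySem.List.pyRange 0 v 1).all
        (fun u => !(PySem.List.pyGetD lblB u 0 == PySem.List.pyGetD lblB v 0)))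
      (fun v => PySem.Set.ofList ((PySem.List.pyRange 0 (n : Int) 1).filter
        (fun u => PySem.List.pyGetD lblB u 0 == PySem.List.pyGetD lblB v 0)))
      (PySem.List.pyRange 0 (n : Int) 1) []]
    rw [List.nil_append]
    have hclass : ∀ u v : Int, inb n u → inb n v →
        ((PySem.List.pyGetD lblB u 0 == PySem.List.pyGetD lblB v 0) = (ρ u == ρ v)) := by
      intro u v hu hv
      have h := rootU_eq_iff hFin u v hu hv
      simp only [ufGet] at h
      apply Bool.eq_iff_iff.mpr
      simp only [beq_iff_eq]
      exact h.symm
    have hfilter : (PySem.List.pyRange 0 (n : Int) 1).filter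
        (fun v => (PySem.List.pyRange 0 v 1).all
          (fun u => !(PySem.List.pyGetD lblB u 0 == PySem.List.pyGetD lblB v 0)))
        = firsts ρ (n : Int) := by
      rw [firsts]
      apply List.filter_congr
      intro v hv
      obtain ⟨hv0, hv1⟩ := PySem.List.mem_pyRange_one.mp hv
      apply Bool.eq_iff_iff.mpr
      rw [List.all_eq_true, decide_eq_true_eq]
      constructor
      · intro hall u hu
        obtain ⟨hu0, hu1⟩ := PySem.List.mem_pyRange_one.mp hu
        have h2 := hall u hu
        rw [hclass u v ⟨hu0, by omega⟩ ⟨hv0, hv1⟩] at h2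
        simpa using h2
      · intro hall u hu
        obtain ⟨hu0, hu1⟩ := PySem.List.mem_pyRange_one.mp hu
        rw [hclass u v ⟨hu0, by omega⟩ ⟨hv0, hv1⟩]
        simpa using hall u hu
    rw [hfilter]
    apply List.map_congr_left
    intro v hv
    obtain ⟨hv0, hv1, _⟩ := (mem_firsts ρ (n : Int) v).mp hv
    have hfeq : (PySem.List.pyRange 0 (n : Int) 1).filter
        (fun u => PySem.List.pyGetD lblB u 0 == PySem.List.pyGetD lblB v 0)
        = (PySem.List.pyRange 0 (n : Int) 1).filter (fun u => ρ u == ρ v) := by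
      apply List.filter_congr
      intro u hu
      obtain ⟨hu0, hu1⟩ := PySem.List.mem_pyRange_one.mp hu
      exact hclass u v ⟨hu0, hu1⟩ ⟨hv0, hv1⟩
    rw [hfeq]
    exact (PySem.Set.ofList_eq_self_of_nodup _ ((PySem.List.nodup_pyRange_one 0 (n : Int)).filter _)).symm
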